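-- pv_equiv track=rewrite | github.com/mathbeveridge/asm | triangle/map_ballot_tss.py | get_diag_count
-- ===== SOURCE A (Python) =====
-- def get_diag_count(triangle):
--     size = len(triangle)
--     diag_count = []
--
--     for i in range(size):
--         sum = 0
--         for j in range(i+1):
--             sum = sum + triangle[i-j][j]
--         diag_count.append(sum)
--
--     return diag_count
-- ===== SOURCE B (Python) =====
-- def get_diag_count(triangle):
--     size = len(triangle)
--     diag_count = [0] * size
--     for r in range(size - 1, -1, -1):
--         for c in range(size - r):
--             diag_count[r + c] += triangle[r][c]
--     return diag_count
-- ===== Notes on version B (the rewrite author's own statement) =====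
-- stated objective: alternative
-- what changed: Replaces the per-diagonal gather (for each diagonal i, sum triangle[i-j][j]) by a single scatter pass that adds each element triangle[r][c] into bucket r+c of a preallocated result array, iterating rows in descending order.
import Mathlib
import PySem

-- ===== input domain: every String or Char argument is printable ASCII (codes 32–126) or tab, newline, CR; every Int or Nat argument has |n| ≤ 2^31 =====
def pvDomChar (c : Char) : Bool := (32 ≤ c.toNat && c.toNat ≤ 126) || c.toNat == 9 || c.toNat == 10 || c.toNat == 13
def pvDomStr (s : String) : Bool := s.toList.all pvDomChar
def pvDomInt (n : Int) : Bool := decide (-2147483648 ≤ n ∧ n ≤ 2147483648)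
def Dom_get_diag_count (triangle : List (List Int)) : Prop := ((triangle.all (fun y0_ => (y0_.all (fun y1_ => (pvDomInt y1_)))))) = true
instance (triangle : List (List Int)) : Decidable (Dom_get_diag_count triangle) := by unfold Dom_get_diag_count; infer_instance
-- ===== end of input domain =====

-- B replaces A's per-diagonal gather (nested scan summing triangle[i-j][j] for each diagonal i) by a
-- single scatter pass adding each triangle[r][c] into bucket r+c of a preallocated result list
-- (alternative decomposition, same cost).

-- ===== PORT A =====
def get_diag_count (triangle : List (List Int)) : List Int :=
  let size : Int := PySem.List.len triangle
  (PySem.List.pyRange 0 size 1).foldl (fun dc i =>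
    dc ++ [(PySem.List.pyRange 0 (i + 1) 1).foldl (fun s j =>
      s + PySem.List.pyGetD (PySem.List.pyGetD triangle (i - j) []) j 0) 0]) []

-- ===== PORT B =====
def get_diag_count_alt (triangle : List (List Int)) : List Int :=
  let size : Int := PySem.List.len triangle
  let dc0 : List Int := List.replicate triangle.length 0
  (PySem.List.pyRange (size - 1) (-1) (-1)).foldl (fun dc r =>
    (PySem.List.pyRange 0 (size - r) 1).foldl (fun dc' c =>
      PySem.List.pySetD dc' (r + c)
        (PySem.List.pyGetD dc' (r + c) 0 + PySem.List.pyGetD (PySem.List.pyGetD triangle r []) c 0)) dc) dc0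

-- ===== PRECONDITION & SPEC =====
-- Pre_ excludes exactly the ragged inputs on which the Python A raises IndexError: row r must carry
-- at least size - r entries (the elements lying on anti-diagonals 0..size-1).
def Pre_get_diag_count (triangle : List (List Int)) : Prop :=
  ∀ r, r < triangle.length → triangle.length - r ≤ (triangle.getD r []).length
instance (triangle : List (List Int)) : Decidable (Pre_get_diag_count triangle) := by
  unfold Pre_get_diag_count; infer_instance
def pvWitness_get_diag_count : List (List Int) := [[1, 2, 3], [4, 5], [6]]
def Spec_get_diag_count (triangle : List (List Int)) (out : List Int) : Prop := out = get_diag_count_alt triangle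
instance (triangle : List (List Int)) (out : List Int) : Decidable (Spec_get_diag_count triangle out) := by unfold Spec_get_diag_count; infer_instance

-- ===== CLAIM (what is proved, stated in full; the proofs are below) =====
def Claim_equal_get_diag_count : Prop := ∀ (triangle : List (List Int)), Dom_get_diag_count triangle → Pre_get_diag_count triangle → Spec_get_diag_count triangle (get_diag_count triangle)

-- ===== LEMMAS AND PROOFS =====

-- the element at row r, column c (total form; only consulted where both ports consult it)
def pvElem (triangle : List (List Int)) (r c : Nat) : Int := (triangle.getD r []).getD c 0

-- the common characterization both ports are reduced to: the list of anti-diagonal sums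
def pvSpecList (triangle : List (List Int)) : List Int :=
  (List.range triangle.length).map (fun d =>
    ((List.range (d + 1)).map (fun j => pvElem triangle (d - j) j)).sum)

theorem portA_eq (triangle : List (List Int)) :
    get_diag_count triangle = pvSpecList triangle := by
  unfold get_diag_count pvSpecList
  simp only [PySem.List.len_eq, PySem.List.pyRange_zero_natCast, List.foldl_map,
    PySem.List.foldl_append_singleton_eq_map]
  simp only [List.nil_append]
  apply List.map_congr_left
  intro i hi
  have : ((i:Int) + 1) = ((i + 1 : Nat) : Int) := by push_cast; ring
  rw [this, PySem.List.pyRange_zero_natCast, List.foldl_map, PySem.List.foldl_add, zero_add]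
  congr 1
  apply List.map_congr_left
  intro j hj
  simp only [List.mem_range] at hj
  have : ((i:Int) - (j:Int)) = ((i - j : Nat) : Int) := by omega
  rw [this, PySem.List.pyGetD_natCast, PySem.List.pyGetD_natCast]
  rfl

-- B's inner loop: scatter row r into columns 0..m-1 of the accumulator
def pvInner (triangle : List (List Int)) (r : Nat) (m : Int) (dc : List Int) : List Int :=
  (PySem.List.pyRange 0 m 1).foldl (fun dc' c =>
    PySem.List.pySetD dc' ((r:Int) + c)
      (PySem.List.pyGetD dc' ((r:Int) + c) 0 + PySem.List.pyGetD (PySem.List.pyGetD triangle (r:Int) []) c 0)) dc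

theorem pvInner_len (triangle : List (List Int)) (r : Nat) (m : Nat) (dc : List Int) :
    (pvInner triangle r m dc).length = dc.length := by
  induction m generalizing dc with
  | zero => simp [pvInner, PySem.List.pyRange_one_eq_nil]
  | succ m ih =>
    unfold pvInner at *
    have hc : ((m + 1 : Nat) : Int) = (m : Int) + 1 := by push_cast; ring
    rw [hc, PySem.List.pyRange_one_succ_right (by positivity), List.foldl_append]
    simp only [List.foldl_cons, List.foldl_nil]
    rw [PySem.List.length_pySetD, ih]

theorem pvInner_step (triangle : List (List Int)) (r m : Nat) (dc : List Int) :
    pvInner triangle r ((m + 1 : Nat) : Int) dc =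
      PySem.List.pySetD (pvInner triangle r (m : Int) dc) ((r : Int) + (m : Int))
        (PySem.List.pyGetD (pvInner triangle r (m : Int) dc) ((r : Int) + (m : Int)) 0 +
          PySem.List.pyGetD (PySem.List.pyGetD triangle (r : Int) []) (m : Int) 0) := by
  unfold pvInner
  have hc : ((m + 1 : Nat) : Int) = (m : Int) + 1 := by push_cast; ring
  rw [hc, PySem.List.pyRange_one_succ_right (by positivity), List.foldl_append]
  simp

theorem pvInner_getD (triangle : List (List Int)) (r m : Nat) :
    ∀ (dc : List Int), r + m ≤ dc.length → ∀ d : Nat,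
    (pvInner triangle r m dc).getD d 0 =
      dc.getD d 0 + (if r ≤ d ∧ d < r + m then pvElem triangle r (d - r) else 0) := by
  induction m with
  | zero => intro dc hm d; simp [pvInner, PySem.List.pyRange_one_eq_nil]
  | succ m ih =>
    intro dc hm d
    rw [pvInner_step]
    have hrm : ((r:Int) + (m:Int)) = ((r + m : Nat) : Int) := by push_cast; ring
    rw [hrm, PySem.List.pySetD_natCast, PySem.List.pyGetD_natCast, PySem.List.pyGetD_natCast,
      PySem.List.pyGetD_natCast]
    have hlen : (pvInner triangle r (m:Int) dc).length = dc.length := pvInner_len triangle r m dc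
    have hIH := ih dc (by omega)
    have hgetset : ∀ j : Nat,
        ((pvInner triangle r (m:Int) dc).set (r + m)
          ((pvInner triangle r (m:Int) dc).getD (r + m) 0 + (triangle.getD r []).getD m 0)).getD j 0
        = if r + m = j then (pvInner triangle r (m:Int) dc).getD (r+m) 0 + (triangle.getD r []).getD m 0
          else (pvInner triangle r (m:Int) dc).getD j 0 := by
      intro j
      simp only [List.getD, List.getElem?_set, hlen]
      split_ifs with h1 h2 <;> simp_all
      omega
    rw [hgetset d]
    by_cases hd : r + m = d
    · subst hd
      rw [if_pos rfl, hIH (r+m)]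
      simp only [pvElem]
      rw [if_neg (by omega), if_pos (by omega)]
      simp
    · rw [if_neg hd, hIH d]
      congr 1
      by_cases h2 : r ≤ d ∧ d < r + m
      · rw [if_pos h2, if_pos (by omega)]
      · rw [if_neg h2, if_neg (by omega)]

-- the contribution of rows 0..k-1 to bucket d
def pvS (triangle : List (List Int)) (k d : Nat) : Int :=
  ∑ r ∈ Finset.range k, if r ≤ d then pvElem triangle r (d - r) else 0

-- B's outer loop, started at row k-1 (k rows left to process)
def pvOuter (triangle : List (List Int)) (k : Nat) (dc : List Int) : List Int :=
  (PySem.List.pyRange ((k : Int) - 1) (-1) (-1)).foldl (fun dc r =>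
    (PySem.List.pyRange 0 ((triangle.length : Int) - r) 1).foldl (fun dc' c =>
      PySem.List.pySetD dc' (r + c)
        (PySem.List.pyGetD dc' (r + c) 0 + PySem.List.pyGetD (PySem.List.pyGetD triangle r []) c 0)) dc) dc

theorem pvOuter_cons (triangle : List (List Int)) (k : Nat) (dc : List Int) :
    pvOuter triangle (k + 1) dc =
      pvOuter triangle k (pvInner triangle k ((triangle.length : Int) - (k : Int)) dc) := by
  unfold pvOuter pvInner
  have h1 : ((k + 1 : Nat) : Int) - 1 = (k : Int) := by push_cast; ring
  rw [h1, PySem.List.pyRange_neg_one_cons (by omega)]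
  simp

theorem pvOuter_spec (triangle : List (List Int)) :
    ∀ (k : Nat), k ≤ triangle.length → ∀ (dc : List Int), dc.length = triangle.length →
      (pvOuter triangle k dc).length = triangle.length ∧
      (∀ d : Nat, d < triangle.length →
        (pvOuter triangle k dc).getD d 0 = dc.getD d 0 + pvS triangle k d) := by
  intro k
  induction k with
  | zero =>
    intro _ dc hdc
    have : pvOuter triangle 0 dc = dc := by
      unfold pvOuter
      rw [PySem.List.pyRange_neg_one_eq_nil (by norm_num)]
      rfl
    rw [this]
    exact ⟨hdc, fun d _ => by simp [pvS]⟩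
  | succ k ih =>
    intro hk dc hdc
    have hcast : ((triangle.length : Int) - (k : Int)) = ((triangle.length - k : Nat) : Int) := by
      omega
    have hinlen : (pvInner triangle k ((triangle.length : Int) - (k : Int)) dc).length = triangle.length := by
      rw [hcast, pvInner_len, hdc]
    rw [pvOuter_cons]
    obtain ⟨hl, hv⟩ := ih (by omega) _ hinlen
    refine ⟨hl, fun d hd => ?_⟩
    rw [hv d hd]
    rw [hcast, pvInner_getD triangle k (triangle.length - k) dc (by omega) d]
    have hsum : pvS triangle (k + 1) d = pvS triangle k d + (if k ≤ d then pvElem triangle k (d - k) else 0) := by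
      unfold pvS
      rw [Finset.sum_range_succ]
    rw [hsum]
    have hif : (if k ≤ d ∧ d < k + (triangle.length - k) then pvElem triangle k (d - k) else 0)
        = (if k ≤ d then pvElem triangle k (d - k) else 0) := by
      by_cases h : k ≤ d
      · rw [if_pos ⟨h, by omega⟩, if_pos h]
      · rw [if_neg (by omega), if_neg h]
    rw [hif]
    ring

theorem pvS_full (triangle : List (List Int)) (d : Nat) (hd : d < triangle.length) :
    pvS triangle triangle.length d =
      ((List.range (d + 1)).map (fun j => pvElem triangle (d - j) j)).sum := by
  unfold pvS
  have h1 : (∑ r ∈ Finset.range triangle.length, if r ≤ d then pvElem triangle r (d - r) else 0)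
      = ∑ r ∈ Finset.range (d + 1), if r ≤ d then pvElem triangle r (d - r) else 0 := by
    refine (Finset.sum_subset (by intro x hx; simp at hx ⊢; omega) ?_).symm
    intro x _ hx
    simp only [Finset.mem_range] at hx
    rw [if_neg (by omega)]
  rw [h1]
  have h2 : (∑ r ∈ Finset.range (d + 1), if r ≤ d then pvElem triangle r (d - r) else 0)
      = ∑ r ∈ Finset.range (d + 1), pvElem triangle r (d - r) := by
    refine Finset.sum_congr rfl fun x hx => ?_
    simp only [Finset.mem_range] at hx
    rw [if_pos (by omega)]
  rw [h2]
  have h3 : (∑ r ∈ Finset.range (d + 1), pvElem triangle r (d - r))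
      = ∑ j ∈ Finset.range (d + 1), pvElem triangle (d - j) j := by
    rw [← Finset.sum_range_reflect (fun j => pvElem triangle (d - j) j) (d + 1)]
    refine Finset.sum_congr rfl fun x hx => ?_
    simp only [Finset.mem_range] at hx
    congr 1
    omega
  rw [h3]
  rfl

theorem portB_eq (triangle : List (List Int)) :
    get_diag_count_alt triangle = pvSpecList triangle := by
  have h0 : get_diag_count_alt triangle
      = pvOuter triangle triangle.length (List.replicate triangle.length 0) := by
    unfold get_diag_count_alt pvOuter
    simp [PySem.List.len_eq]
  rw [h0]
  obtain ⟨hl, hv⟩ := pvOuter_spec triangle triangle.length le_rfl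
    (List.replicate triangle.length 0) (by simp)
  apply List.ext_getElem
  · rw [hl]; simp [pvSpecList]
  · intro d hd1 hd2
    have hdn : d < triangle.length := by rwa [hl] at hd1
    have := hv d hdn
    rw [List.getD_eq_getElem _ _ hd1] at this
    rw [this]
    have hrep : (List.replicate triangle.length (0:Int)).getD d 0 = 0 := by
      simp [List.getD]
    rw [hrep, zero_add, pvS_full triangle d hdn]
    simp [pvSpecList]

-- ===== VERDICT (by name: the statement is the Claim_ definition above) =====
theorem get_diag_count_spec : Claim_equal_get_diag_count := by
  intro triangle _ _
  unfold Spec_get_diag_count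
  rw [portA_eq triangle, portB_eq triangle]
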